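-- pv_equiv track=rewrite | github.com/MiaHuebscher/Sudoku-Solver | Sudoku.py | switch_boxes_rows
-- ===== SOURCE A (Python) =====
-- def switch_boxes_rows(board):
--     new_board = []
--     first_row_index = 0
--     next_row_index = 3
--     for i in range(3):
--         first_row = []
--         sec_row = []
--         third_row = []
--         for row in board[first_row_index:next_row_index]:
--             first_col_index = 0
--             next_col_index = 3
--             first_row += row[first_col_index:next_col_index]
--             first_col_index += 3
--             next_col_index += 3
--             sec_row += row[first_col_index:next_col_index]
--             first_col_index += 3
--             next_col_index += 3
--             third_row += row[first_col_index:next_col_index]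
--
--         new_board.append(first_row)
--         new_board.append(sec_row)
--         new_board.append(third_row)
--
--         first_row_index += 3
--         next_row_index += 3
--
--     return new_board
-- ===== SOURCE B (Python) =====
-- def switch_boxes_rows(board):
--     buckets = [[] for _ in range(9)]
--     for i, row in enumerate(board[:9]):
--         for j, x in enumerate(row[:9]):
--             buckets[(i // 3) * 3 + j // 3].append(x)
--     return buckets
-- ===== Notes on version B (the rewrite author's own statement) =====
-- stated objective: alternative
-- what changed: B is a single cell-level scatter pass: it walks every cell once and appends it to the bucket whose index (i//3)*3 + j//3 is computed arithmetically from the cell's coordinates, instead of A's gather by band slicing (board[b:b+3]) and per-row 3-cell slice accumulation into three parallel row lists.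
import Mathlib
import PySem

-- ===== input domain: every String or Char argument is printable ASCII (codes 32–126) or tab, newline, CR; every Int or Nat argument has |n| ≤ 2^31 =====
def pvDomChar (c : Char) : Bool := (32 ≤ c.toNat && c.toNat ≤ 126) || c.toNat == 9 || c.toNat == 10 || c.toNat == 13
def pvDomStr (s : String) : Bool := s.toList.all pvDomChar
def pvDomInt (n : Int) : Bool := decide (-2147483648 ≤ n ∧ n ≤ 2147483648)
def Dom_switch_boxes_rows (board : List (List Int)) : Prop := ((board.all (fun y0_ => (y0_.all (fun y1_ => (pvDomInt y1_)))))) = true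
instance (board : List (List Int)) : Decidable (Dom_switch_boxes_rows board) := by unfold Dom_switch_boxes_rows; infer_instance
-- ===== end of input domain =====

-- B is a single cell-level scatter pass (each cell appended to the bucket computed arithmetically
-- from its coordinates), instead of A's gather by band slicing into three parallel accumulators;
-- objective: alternative (same cost, different algorithm).


-- ===== PORT A =====
def switch_boxes_rows (board : List (List Int)) : List (List Int) :=
  -- outer loop: state (new_board, first_row_index, next_row_index)
  (((List.range 3).foldl (fun (st : List (List Int) × Int × Int) _ =>
    let inner := (PySem.List.slice board (some st.2.1) (some st.2.2)).foldl
      (fun (t : List Int × List Int × List Int) row =>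
        -- first_col_index/next_col_index start at 0/3 and are bumped by 3 twice
        (t.1 ++ PySem.List.slice row (some 0) (some 3),
         t.2.1 ++ PySem.List.slice row (some 3) (some 6),
         t.2.2 ++ PySem.List.slice row (some 6) (some 9))) ([], [], [])
    (st.1 ++ [inner.1] ++ [inner.2.1] ++ [inner.2.2], st.2.1 + 3, st.2.2 + 3))
    ([], 0, 3))).1

-- ===== PORT B =====
def switch_boxes_rows_alt (board : List (List Int)) : List (List Int) :=
  -- buckets = [[] for _ in range(9)]; scatter every cell of board[:9]/row[:9] into
  -- buckets[(i//3)*3 + j//3] (the index is always ≥ 0, so .toNat is Python's indexing)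
  (PySem.List.enumerate (PySem.List.slice board none (some 9))).foldl
    (fun (bs : List (List Int)) p =>
      (PySem.List.enumerate (PySem.List.slice p.2 none (some 9))).foldl
        (fun (bs2 : List (List Int)) q =>
          bs2.modify ((PySem.Int.floordiv p.1 3) * 3 + PySem.Int.floordiv q.1 3).toNat
            (· ++ [q.2])) bs)
    (List.replicate 9 [])

-- ===== PRECONDITION & SPEC =====
def Spec_switch_boxes_rows (board : List (List Int)) (out : List (List Int)) : Prop := out = switch_boxes_rows_alt board
instance (board : List (List Int)) (out : List (List Int)) : Decidable (Spec_switch_boxes_rows board out) := by unfold Spec_switch_boxes_rows; infer_instance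

-- ===== CLAIM (what is proved, stated in full; the proofs are below) =====
def Claim_equal_switch_boxes_rows : Prop := ∀ (board : List (List Int)), Dom_switch_boxes_rows board → Spec_switch_boxes_rows board (switch_boxes_rows board)

-- ===== LEMMAS AND PROOFS =====

theorem modify_fun_id (l : List (List Int)) (n : Nat) :
    l.modify n (fun x => x) = l := by
  induction l generalizing n with
  | nil => simp
  | cons a t ih => cases n <;> simp [ih]

-- scattering the first 9 cells of one row into buckets t, t+1, t+2 appends the row's
-- three 3-cell chunks (in simp-normal take/drop form) to those buckets
set_option maxHeartbeats 2000000 in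
theorem scatter (t : Int) (ht : 0 ≤ t) (bs : List (List Int)) (row : List Int) :
    List.foldl (fun (bs2 : List (List Int)) (q : Int × Int) =>
        bs2.modify (t + q.1 / 3).toNat (fun x => x ++ [q.2])) bs
      (PySem.List.enumerate (List.take (min 9 row.length) row))
    = ((bs.modify t.toNat (· ++ List.take (min 3 row.length) row)).modify
        (t.toNat + 1)
          (· ++ List.take (min 6 row.length - min 3 row.length)
                  (List.drop (min 3 row.length) row))).modify
        (t.toNat + 2)
          (· ++ List.take (min 9 row.length - min 6 row.length)
                  (List.drop (min 6 row.length) row)) := by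
  have h1 : (t + 1).toNat = t.toNat + 1 := by omega
  have h2 : (t + 2).toNat = t.toNat + 2 := by omega
  rcases row with _|⟨a0,_|⟨a1,_|⟨a2,_|⟨a3,_|⟨a4,_|⟨a5,_|⟨a6,_|⟨a7,_|⟨a8,rest⟩⟩⟩⟩⟩⟩⟩⟩⟩ <;>
    simp [PySem.List.enumerate, List.foldl, h1, h2,
          List.modify_modify_eq, Function.comp_def, modify_fun_id, List.append_assoc]

theorem scatter0 (bs : List (List Int)) (row : List Int) :
    List.foldl (fun (bs2 : List (List Int)) (q : Int × Int) =>
        bs2.modify (q.1 / 3).toNat (fun x => x ++ [q.2])) bs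
      (PySem.List.enumerate (List.take (min 9 row.length) row))
    = ((bs.modify 0 (· ++ List.take (min 3 row.length) row)).modify 1
          (· ++ List.take (min 6 row.length - min 3 row.length)
                  (List.drop (min 3 row.length) row))).modify 2
          (· ++ List.take (min 9 row.length - min 6 row.length)
                  (List.drop (min 6 row.length) row)) := by
  have h := scatter 0 (by omega) bs row
  simpa using h

theorem scatter3 (bs : List (List Int)) (row : List Int) :
    List.foldl (fun (bs2 : List (List Int)) (q : Int × Int) =>
        bs2.modify (3 + q.1 / 3).toNat (fun x => x ++ [q.2])) bs
      (PySem.List.enumerate (List.take (min 9 row.length) row))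
    = ((bs.modify 3 (· ++ List.take (min 3 row.length) row)).modify 4
          (· ++ List.take (min 6 row.length - min 3 row.length)
                  (List.drop (min 3 row.length) row))).modify 5
          (· ++ List.take (min 9 row.length - min 6 row.length)
                  (List.drop (min 6 row.length) row)) := by
  have h := scatter 3 (by omega) bs row
  simpa using h

theorem scatter6 (bs : List (List Int)) (row : List Int) :
    List.foldl (fun (bs2 : List (List Int)) (q : Int × Int) =>
        bs2.modify (6 + q.1 / 3).toNat (fun x => x ++ [q.2])) bs
      (PySem.List.enumerate (List.take (min 9 row.length) row))
    = ((bs.modify 6 (· ++ List.take (min 3 row.length) row)).modify 7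
          (· ++ List.take (min 6 row.length - min 3 row.length)
                  (List.drop (min 3 row.length) row))).modify 8
          (· ++ List.take (min 9 row.length - min 6 row.length)
                  (List.drop (min 6 row.length) row)) := by
  have h := scatter 6 (by omega) bs row
  simpa using h

-- ===== VERDICT (by name: the statement is the Claim_ definition above) =====
set_option maxHeartbeats 4000000 in
theorem switch_boxes_rows_spec : Claim_equal_switch_boxes_rows := by
  intro board _
  show switch_boxes_rows board = switch_boxes_rows_alt board
  rcases board with _|⟨r0,_|⟨r1,_|⟨r2,_|⟨r3,_|⟨r4,_|⟨r5,_|⟨r6,_|⟨r7,_|⟨r8,rest⟩⟩⟩⟩⟩⟩⟩⟩⟩ <;>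
    simp [switch_boxes_rows, switch_boxes_rows_alt, List.range_succ,
          PySem.List.slice, PySem.List.enumerate, List.foldl, List.replicate,
          scatter0, scatter3, scatter6,
          List.modify_zero_cons, List.modify_succ_cons, List.append_assoc]
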